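-- pv_equiv track=rewrite | github.com/kjh1002/DataCrawling | crawling_project/crawling_example/CRW_ex05-4_KJH.py | aggregate_by_sido
-- ===== SOURCE A (Python) =====
-- from collections import defaultdict
--
-- def aggregate_by_sido(data):
--     sido_stats = defaultdict(lambda: {
--         '충전소수': 0,
--         '급속충전기': 0,
--         '완속충전기': 0,
--         '전체충전기': 0
--     })
--
--     for item in data:
--         metro = item.get('metro', '알 수 없음')
--         rapid_cnt = int(item.get('rapidCnt', 0))
--         slow_cnt = int(item.get('slowCnt', 0))
--
--         sido_stats[metro]['충전소수'] += 1
--         sido_stats[metro]['급속충전기'] += rapid_cnt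
--         sido_stats[metro]['완속충전기'] += slow_cnt
--         sido_stats[metro]['전체충전기'] += rapid_cnt + slow_cnt
--
--     return dict(sido_stats)
-- ===== SOURCE B (Python) =====
-- def aggregate_by_sido(data):
--     # Pass 1: group the (rapid, slow) counts per metro (int() runs here, in input order).
--     groups = {}
--     for item in data:
--         metro = item.get('metro', '알 수 없음')
--         pair = (int(item.get('rapidCnt', 0)), int(item.get('slowCnt', 0)))
--         groups.setdefault(metro, []).append(pair)
--     # Pass 2: reduce each group to its four statistics.
--     return {
--         metro: {
--             '충전소수': len(pairs),
--             '급속충전기': sum(r for r, _ in pairs),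
--             '완속충전기': sum(s for _, s in pairs),
--             '전체충전기': sum(r for r, _ in pairs) + sum(s for _, s in pairs),
--         }
--         for metro, pairs in groups.items()
--     }
-- ===== Notes on version B (the rewrite author's own statement) =====
-- stated objective: alternative
-- what changed: A keeps one running 4-counter dict per region and increments all four statistics inside the loop; B is a two-pass group-then-reduce: one pass groups the parsed (rapid, slow) pairs per metro, then a dict comprehension computes each statistic by len/sum over the group.
import Mathlib
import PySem

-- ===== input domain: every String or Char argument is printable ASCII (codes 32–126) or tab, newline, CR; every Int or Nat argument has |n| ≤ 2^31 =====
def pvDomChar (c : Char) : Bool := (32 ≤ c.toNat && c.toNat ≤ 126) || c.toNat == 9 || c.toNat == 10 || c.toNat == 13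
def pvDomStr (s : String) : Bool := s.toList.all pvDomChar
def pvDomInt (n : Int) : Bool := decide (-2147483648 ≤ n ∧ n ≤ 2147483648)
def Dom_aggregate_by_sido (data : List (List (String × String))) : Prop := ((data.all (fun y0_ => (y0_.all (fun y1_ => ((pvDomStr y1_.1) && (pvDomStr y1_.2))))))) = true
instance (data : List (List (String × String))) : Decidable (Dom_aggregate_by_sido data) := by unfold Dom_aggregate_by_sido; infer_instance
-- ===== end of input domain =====

-- B restructures A's single incremental-update loop as group-then-reduce (two passes); same cost, no speed claim.

-- int(item.get(key, 0)): 0 if the key is absent, else int(value).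
-- The .getD 0 arm is unreachable inside Pre_ (which demands the parse succeed).
def pvGetInt (it : PySem.Dict String String) (key : String) : Int :=
  match it.get? key with
  | none => 0
  | some s => (PySem.Int.ofStr? s).getD 0

-- ===== PORT A =====
def aDefault : PySem.Dict String Int :=
  PySem.Dict.mk [("충전소수", 0), ("급속충전기", 0), ("완속충전기", 0), ("전체충전기", 0)]

def aStep (d : PySem.Dict String (PySem.Dict String Int)) (item : List (String × String)) :
    PySem.Dict String (PySem.Dict String Int) :=
  let it := PySem.Dict.mk item
  let metro := (it.get? "metro").getD "알 수 없음"
  let rapid := pvGetInt it "rapidCnt"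
  let slow := pvGetInt it "slowCnt"
  -- sido_stats[metro]['…'] += …  (defaultdict: modify with the default row)
  let d := d.modify metro aDefault (fun m => m.modify "충전소수" 0 (· + 1))
  let d := d.modify metro aDefault (fun m => m.modify "급속충전기" 0 (· + rapid))
  let d := d.modify metro aDefault (fun m => m.modify "완속충전기" 0 (· + slow))
  d.modify metro aDefault (fun m => m.modify "전체충전기" 0 (· + (rapid + slow)))

def aggregate_by_sido (data : List (List (String × String))) : List (String × List (String × Int)) :=
  (data.foldl aStep PySem.Dict.empty).items.map (fun p => (p.1, p.2.items))

-- ===== PORT B =====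
def bStep (g : PySem.Dict String (List (Int × Int))) (item : List (String × String)) :
    PySem.Dict String (List (Int × Int)) :=
  let it := PySem.Dict.mk item
  let metro := (it.get? "metro").getD "알 수 없음"
  let pair := (pvGetInt it "rapidCnt", pvGetInt it "slowCnt")
  (g.setdefault metro []).modify metro [] (· ++ [pair])

def bStats (ps : List (Int × Int)) : List (String × Int) :=
  [("충전소수", (ps.length : Int)),
   ("급속충전기", (ps.map Prod.fst).sum),
   ("완속충전기", (ps.map Prod.snd).sum),
   ("전체충전기", (ps.map Prod.fst).sum + (ps.map Prod.snd).sum)]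

def aggregate_by_sido_alt (data : List (List (String × String))) : List (String × List (String × Int)) :=
  (data.foldl bStep PySem.Dict.empty).items.map (fun p => (p.1, bStats p.2))

-- ===== PRECONDITION & SPEC =====
-- Pre_ excludes exactly the inputs where int() raises ValueError in Python (both A and B raise there,
-- in the same place): a present 'rapidCnt'/'slowCnt' value that does not parse as an int.
def Pre_aggregate_by_sido (data : List (List (String × String))) : Prop :=
  (data.all (fun item =>
    (((PySem.Dict.mk item).get? "rapidCnt").all (fun s => (PySem.Int.ofStr? s).isSome)) &&
    (((PySem.Dict.mk item).get? "slowCnt").all (fun s => (PySem.Int.ofStr? s).isSome)))) = true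
instance (data : List (List (String × String))) : Decidable (Pre_aggregate_by_sido data) := by
  unfold Pre_aggregate_by_sido; infer_instance

def pvWitness_aggregate_by_sido : (List (List (String × String))) :=
  [[("metro", "Seoul"), ("rapidCnt", "3"), ("slowCnt", "4")], [("rapidCnt", "1")]]

def Spec_aggregate_by_sido (data : List (List (String × String))) (out : List (String × List (String × Int))) : Prop := out = aggregate_by_sido_alt data
instance (data : List (List (String × String))) (out : List (String × List (String × Int))) : Decidable (Spec_aggregate_by_sido data out) := by unfold Spec_aggregate_by_sido; infer_instance

-- ===== CLAIM (what is proved, stated in full; the proofs are below) =====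
def Claim_equal_aggregate_by_sido : Prop := ∀ (data : List (List (String × String))), Dom_aggregate_by_sido data → Pre_aggregate_by_sido data → Spec_aggregate_by_sido data (aggregate_by_sido data)

-- ===== LEMMAS AND PROOFS =====

-- A's running state is B's grouping state with every group summarised by bStats.
def mapD (d : PySem.Dict String (List (Int × Int))) : PySem.Dict String (PySem.Dict String Int) :=
  PySem.Dict.mk (d.items.map (fun p => (p.1, PySem.Dict.mk (bStats p.2))))

lemma contains_mapD (d : PySem.Dict String (List (Int × Int))) (k : String) :
    (mapD d).contains k = d.contains k := by
  simp [mapD, PySem.Dict.contains, List.any_map, Function.comp_def]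

lemma get?_mapD (d : PySem.Dict String (List (Int × Int))) (k : String) :
    (mapD d).get? k = (d.get? k).map (fun ps => PySem.Dict.mk (bStats ps)) := by
  simp only [mapD, PySem.Dict.get?, List.find?_map, Function.comp_def]
  cases (d.items.find? (fun p => p.1 == k)) <;> rfl

lemma insert_mapD (d : PySem.Dict String (List (Int × Int))) (k : String) (ps : List (Int × Int)) :
    (mapD d).insert k (PySem.Dict.mk (bStats ps)) = mapD (d.insert k ps) := by
  by_cases hc : d.contains k = true
  · simp only [PySem.Dict.insert, contains_mapD, hc, if_true]
    unfold mapD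
    simp only [List.map_map]
    congr 1
    apply List.map_congr_left
    intro p _
    by_cases h : p.1 = k <;> simp [h]
  · have hc' : d.contains k = false := by simpa using hc
    simp only [PySem.Dict.insert, contains_mapD, hc', Bool.false_eq_true, if_false]
    unfold mapD
    simp

lemma bStats_append (ps : List (Int × Int)) (r s : Int) :
    bStats (ps ++ [(r, s)]) =
      [("충전소수", (ps.length : Int) + 1),
       ("급속충전기", (ps.map Prod.fst).sum + r),
       ("완속충전기", (ps.map Prod.snd).sum + s),
       ("전체충전기", ((ps.map Prod.fst).sum + (ps.map Prod.snd).sum) + (r + s))] := by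
  simp [bStats]
  ring

-- the four inner '+=' updates on a summarised row
lemma innerChain_stats (ps : List (Int × Int)) (r s : Int) :
    ((((PySem.Dict.mk (bStats ps)).modify "충전소수" 0 (· + 1)).modify "급속충전기" 0
        (· + r)).modify "완속충전기" 0 (· + s)).modify "전체충전기" 0 (· + (r + s)) =
      PySem.Dict.mk (bStats (ps ++ [(r, s)])) := by
  rw [bStats_append]
  simp [bStats, PySem.Dict.modify, PySem.Dict.insert, PySem.Dict.contains, PySem.Dict.getD,
    PySem.Dict.get?]

lemma innerChain_default (r s : Int) :
    (((aDefault.modify "충전소수" 0 (· + 1)).modify "급속충전기" 0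
        (· + r)).modify "완속충전기" 0 (· + s)).modify "전체충전기" 0 (· + (r + s)) =
      PySem.Dict.mk (bStats [(r, s)]) := by
  simp [aDefault, bStats, PySem.Dict.modify, PySem.Dict.insert, PySem.Dict.contains,
    PySem.Dict.getD, PySem.Dict.get?]

lemma step_comm (d : PySem.Dict String (List (Int × Int))) (item : List (String × String)) :
    aStep (mapD d) item = mapD (bStep d item) := by
  unfold aStep bStep
  simp only [PySem.Dict.modify, PySem.Dict.getD_insert_self, PySem.Dict.insert_insert_self]
  set metro := ((PySem.Dict.mk item).get? "metro").getD "알 수 없음" with hm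
  set r := pvGetInt (PySem.Dict.mk item) "rapidCnt" with hr
  set s := pvGetInt (PySem.Dict.mk item) "slowCnt" with hs
  by_cases hc : d.contains metro = true
  · have hsome : (d.get? metro).isSome := by rw [← PySem.Dict.contains_eq_isSome_get?]; exact hc
    obtain ⟨ps0, hps0⟩ := Option.isSome_iff_exists.mp hsome
    have hgd : (mapD d).getD metro aDefault = PySem.Dict.mk (bStats ps0) := by
      rw [PySem.Dict.getD_eq_get?_getD, get?_mapD, hps0]; rfl
    rw [hgd]
    have h4 := innerChain_stats ps0 r s
    simp only [PySem.Dict.modify] at h4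
    rw [h4, insert_mapD]
    simp only [PySem.Dict.setdefault, hc, if_true, PySem.Dict.getD_eq_get?_getD, hps0,
      Option.getD_some]
  · have hc' : d.contains metro = false := by simpa using hc
    have hnone : d.get? metro = none := by
      cases hg : d.get? metro with
      | none => rfl
      | some v => rw [PySem.Dict.contains_eq_isSome_get?, hg] at hc; simp at hc
    have hgd : (mapD d).getD metro aDefault = aDefault := by
      rw [PySem.Dict.getD_eq_get?_getD, get?_mapD, hnone]; rfl
    rw [hgd]
    have h4 := innerChain_default r s
    simp only [PySem.Dict.modify] at h4
    rw [h4, insert_mapD]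
    have hsd : d.setdefault metro [] = d.insert metro [] := by
      simp [PySem.Dict.setdefault, PySem.Dict.insert, hc']
    rw [hsd, PySem.Dict.getD_insert_self, PySem.Dict.insert_insert_self]
    simp

lemma fold_comm (data : List (List (String × String))) (d : PySem.Dict String (List (Int × Int))) :
    data.foldl aStep (mapD d) = mapD (data.foldl bStep d) := by
  induction data generalizing d with
  | nil => rfl
  | cons item rest ih => simp only [List.foldl_cons, step_comm, ih]

-- ===== VERDICT (by name: the statement is the Claim_ definition above) =====
theorem aggregate_by_sido_spec : Claim_equal_aggregate_by_sido := by
  intro data _ _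
  unfold Spec_aggregate_by_sido aggregate_by_sido aggregate_by_sido_alt
  have h0 : (PySem.Dict.empty : PySem.Dict String (PySem.Dict String Int)) = mapD PySem.Dict.empty := rfl
  rw [h0, fold_comm]
  simp [mapD, List.map_map, Function.comp_def]
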